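-- pv_equiv track=rewrite | github.com/nlavidas/Diachronic-Linguistics-Platform | _archive/diachronic-valency-corpus/autonomous_agent_simple.py | clean_gutenberg_text
-- ===== SOURCE A (Python) =====
-- def clean_gutenberg_text(text):
--     """Remove Gutenberg headers and footers"""
--     lines = text.split('\n')
--
--     # Find start
--     start_idx = 0
--     for i, line in enumerate(lines):
--         if '*** START' in line or '***START' in line:
--             start_idx = i + 1
--             break
--
--     # Find end
--     end_idx = len(lines)
--     for i in range(len(lines)-1, -1, -1):
--         if '*** END' in lines[i] or '***END' in lines[i]:
--             end_idx = i
--             break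
--
--     return '\n'.join(lines[start_idx:end_idx])
-- ===== SOURCE B (Python) =====
-- def clean_gutenberg_text(text):
--     """Remove Gutenberg headers and footers (single forward pass)."""
--     lines = text.split('\n')
--     start = 0
--     end = len(lines)
--     seen_start = False
--     for i, line in enumerate(lines):
--         if not seen_start and ('*** START' in line or '***START' in line):
--             start = i + 1
--             seen_start = True
--         if '*** END' in line or '***END' in line:
--             end = i
--     return '\n'.join(lines[start:end])
-- ===== Notes on version B (the rewrite author's own statement) =====
-- stated objective: alternative
-- what changed: A scans forward with break for the first START line and then scans backward over indices with break for the last END line; B makes a single forward pass over enumerate(lines) maintaining (start, end, seen_start), recording the first START and the last END in one loop.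
import Mathlib
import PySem

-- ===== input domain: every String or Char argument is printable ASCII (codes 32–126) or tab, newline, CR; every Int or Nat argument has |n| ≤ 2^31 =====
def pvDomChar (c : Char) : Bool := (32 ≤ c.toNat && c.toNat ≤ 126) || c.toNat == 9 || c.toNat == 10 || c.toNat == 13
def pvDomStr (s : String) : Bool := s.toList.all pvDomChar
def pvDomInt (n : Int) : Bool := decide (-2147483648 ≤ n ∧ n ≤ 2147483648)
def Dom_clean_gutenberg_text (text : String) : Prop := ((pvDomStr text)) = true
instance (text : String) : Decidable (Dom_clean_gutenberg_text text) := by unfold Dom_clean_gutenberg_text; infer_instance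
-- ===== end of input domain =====

-- B replaces A's two marker scans (forward-with-break, then a backward index loop) by one
-- forward pass keeping (start, end, seen_start); alternative decomposition, same cost.

-- shared marker tests ('*** START' in line or '***START' in line, resp. END)
def gStart (line : String) : Bool :=
  PySem.Str.isIn "*** START" line || PySem.Str.isIn "***START" line

def gEnd (line : String) : Bool :=
  PySem.Str.isIn "*** END" line || PySem.Str.isIn "***END" line

-- ===== PORT A =====
-- 'for i, line in enumerate(lines): if …: start_idx = i + 1; break' (start_idx initially 0)
def aFindStart : List (Int × String) → Int
  | [] => 0
  | (i, line) :: rest => if gStart line then i + 1 else aFindStart rest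

-- 'for i in range(len(lines)-1, -1, -1): if …: end_idx = i; break' (end_idx initially len(lines))
def aFindEnd (lines : List String) : List Int → Int
  | [] => (lines.length : Int)
  | i :: rest =>
    if gEnd (PySem.List.pyGetD lines i "") then i else aFindEnd lines rest

def clean_gutenberg_text (text : String) : String :=
  let lines := (PySem.Str.split? text "\n").getD []
  let start_idx := aFindStart (PySem.List.enumerate lines 0)
  let end_idx := aFindEnd lines (PySem.List.pyRange ((lines.length : Int) - 1) (-1) (-1))
  PySem.Str.join "\n" (PySem.List.slice lines (some start_idx) (some end_idx))

-- ===== PORT B =====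
-- one step of B's single loop body over (i, line); state (start, end, seen_start)
def bScan (st : Int × Int × Bool) (p : Int × String) : Int × Int × Bool :=
  let s1 := if !st.2.2 && gStart p.2 then p.1 + 1 else st.1
  let seen1 := if !st.2.2 && gStart p.2 then true else st.2.2
  let e1 := if gEnd p.2 then p.1 else st.2.1
  (s1, e1, seen1)

def clean_gutenberg_text_alt (text : String) : String :=
  let lines := (PySem.Str.split? text "\n").getD []
  let st := (PySem.List.enumerate lines 0).foldl bScan (0, (lines.length : Int), false)
  PySem.Str.join "\n" (PySem.List.slice lines (some st.1) (some st.2.1))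

-- ===== PRECONDITION & SPEC =====
def Spec_clean_gutenberg_text (text : String) (out : String) : Prop := out = clean_gutenberg_text_alt text
instance (text : String) (out : String) : Decidable (Spec_clean_gutenberg_text text out) := by unfold Spec_clean_gutenberg_text; infer_instance

-- ===== CLAIM (what is proved, stated in full; the proofs are below) =====
def Claim_equal_clean_gutenberg_text : Prop := ∀ (text : String), Dom_clean_gutenberg_text text → Spec_clean_gutenberg_text text (clean_gutenberg_text text)

-- ===== LEMMAS AND PROOFS =====

-- proof-side: forward scan keeping the last END index (what B's loop does to its 2nd component)
def lastEnd : List String → Int → Int → Int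
  | [], _, e => e
  | l :: ls, s, e => lastEnd ls (s + 1) (if gEnd l then s else e)

-- proof-side: first match in a reversed enumeration
def eHelp : List (Int × String) → Int → Int
  | [], d => d
  | p :: ps, d => if gEnd p.2 then p.1 else eHelp ps d

theorem eHelp_append (as : List (Int × String)) (a : Int × String) (d : Int) :
    eHelp (as ++ [a]) d = eHelp as (if gEnd a.2 then a.1 else d) := by
  induction as with
  | nil => simp [eHelp]
  | cons p ps ih => by_cases h : gEnd p.2 <;> simp [eHelp, h, ih]

theorem lastEnd_eq_eHelp (ls : List String) (s e : Int) :
    lastEnd ls s e = eHelp (PySem.List.enumerate ls s).reverse e := by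
  induction ls generalizing s e with
  | nil => simp [lastEnd, eHelp, PySem.List.enumerate_nil]
  | cons l ls ih =>
    rw [lastEnd, PySem.List.enumerate_cons]
    simp only [List.reverse_cons, eHelp_append]
    exact ih (s + 1) _

theorem aFindEnd_eq_eHelp (lines : List String) (js : List Int) :
    aFindEnd lines js = eHelp (js.map (fun i => (i, PySem.List.pyGetD lines i ""))) (lines.length : Int) := by
  induction js with
  | nil => simp [aFindEnd, eHelp]
  | cons j js ih => by_cases h : gEnd (PySem.List.pyGetD lines j "") <;> simp [aFindEnd, eHelp, h, ih]

theorem aFindEnd_eq_lastEnd (lines : List String) :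
    aFindEnd lines (PySem.List.pyRange ((lines.length : Int) - 1) (-1) (-1)) =
      lastEnd lines 0 (lines.length : Int) := by
  rw [aFindEnd_eq_eHelp, lastEnd_eq_eHelp, PySem.List.pyRange_neg_one_eq_reverse]
  have h1 : (-1 : Int) + 1 = 0 := by norm_num
  have h2 : ((lines.length : Int) - 1) + 1 = (lines.length : Int) := by ring
  rw [h1, h2, List.map_reverse]
  congr 1
  have h3 := PySem.List.enumerate_eq_map_pyRange lines ""
  simp only [PySem.List.len] at h3
  rw [h3]

-- once seen_start is true, B's loop never changes start or seen again
theorem foldl_bScan_seen (ls : List String) (s st0 e0 : Int) :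
    (PySem.List.enumerate ls s).foldl bScan (st0, e0, true) = (st0, lastEnd ls s e0, true) := by
  induction ls generalizing s e0 with
  | nil => simp [PySem.List.enumerate_nil, lastEnd]
  | cons l ls ih =>
    rw [PySem.List.enumerate_cons, List.foldl_cons, lastEnd]
    by_cases h : gEnd l <;> simp [bScan, h, ih]

theorem foldl_bScan_main (ls : List String) (s e0 : Int) :
    (PySem.List.enumerate ls s).foldl bScan (0, e0, false) =
      (aFindStart (PySem.List.enumerate ls s), lastEnd ls s e0, ls.any gStart) := by
  induction ls generalizing s e0 with
  | nil => simp [PySem.List.enumerate_nil, aFindStart, lastEnd]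
  | cons l ls ih =>
    rw [PySem.List.enumerate_cons, List.foldl_cons]
    by_cases hs : gStart l
    · by_cases he : gEnd l <;>
        simp [bScan, hs, he, foldl_bScan_seen, aFindStart, lastEnd]
    · by_cases he : gEnd l <;>
        simp [bScan, hs, he, ih, aFindStart, lastEnd]

-- ===== VERDICT (by name: the statement is the Claim_ definition above) =====
theorem clean_gutenberg_text_spec : Claim_equal_clean_gutenberg_text := by
  intro text _
  show clean_gutenberg_text text = clean_gutenberg_text_alt text
  unfold clean_gutenberg_text clean_gutenberg_text_alt
  simp only [foldl_bScan_main, aFindEnd_eq_lastEnd]
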